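-- pv_equiv track=rewrite | github.com/jagadeshwarrao/programming | canvasframes.py | makeFrames
-- ===== SOURCE A (Python) =====
-- def makeFrames(A):
--     p=[]
--     count=0
--     s=set(A)
--     if len(s)==len(A):
--         return count
--     else:
--         for i in s:
--             if A.count(i)>=4:
--                 count=count+A.count(i)//4
--                 if A.count(i)%4>=2:
--                     p.append(i)
--             elif A.count(i)>1 and A.count(i)<4:
--                 p.append(i)
--         count=count+len(p)//2
--         return count
-- ===== SOURCE B (Python) =====
-- def makeFrames(A):
--     B = sorted(A)
--     count = 0
--     pairs = 0
--     i = 0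
--     n = len(B)
--     while i < n:
--         j = i + 1
--         while j < n and B[j] == B[i]:
--             j += 1
--         f = j - i
--         count += f // 4
--         if f % 4 >= 2:
--             pairs += 1
--         i = j
--     return count + pairs // 2
-- ===== Notes on version B (the rewrite author's own statement) =====
-- stated objective: faster
-- what changed: Replaces A's set-building plus repeated A.count scans per distinct element by sorting a copy once and counting maximal runs of equal elements in a single pass.
import Mathlib
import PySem

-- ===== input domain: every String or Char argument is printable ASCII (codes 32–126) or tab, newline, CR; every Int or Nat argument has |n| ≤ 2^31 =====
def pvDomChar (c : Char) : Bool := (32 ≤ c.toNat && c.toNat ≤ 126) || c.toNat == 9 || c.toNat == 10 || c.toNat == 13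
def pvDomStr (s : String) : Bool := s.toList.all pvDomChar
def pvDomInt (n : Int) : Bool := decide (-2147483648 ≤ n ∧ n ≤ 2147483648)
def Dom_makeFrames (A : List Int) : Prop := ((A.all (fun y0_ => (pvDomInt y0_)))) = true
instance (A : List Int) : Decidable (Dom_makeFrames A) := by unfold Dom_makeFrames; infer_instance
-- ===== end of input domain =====

-- B replaces A's set-loop with repeated A.count scans by sort + one run-length pass.

-- ===== PORT A =====
-- literal transliteration of A: build set(A), early return when all elements are
-- distinct, else fold over the set accumulating (p, count) exactly as the Python loop.
def makeFrames (A : List Int) : Int :=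
  let p : List Int := []
  let count : Int := 0
  let s := PySem.Set.ofList A
  if PySem.Set.len s = (A.length : Int) then count
  else
    let pc := s.foldl (fun (st : List Int × Int) i =>
      if 4 ≤ (PySem.List.count A i : Int) then
        let c2 := st.2 + PySem.Int.floordiv (PySem.List.count A i : Int) 4
        if 2 ≤ PySem.Int.mod (PySem.List.count A i : Int) 4 then (st.1 ++ [i], c2)
        else (st.1, c2)
      else if 1 < (PySem.List.count A i : Int) ∧ (PySem.List.count A i : Int) < 4 then
        (st.1 ++ [i], st.2)
      else st) (p, count)
    pc.2 + PySem.Int.floordiv ((pc.1.length : Int)) 2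

-- ===== PORT B =====
-- transliteration of Source B's while loop: each iteration consumes one maximal run
-- (the inner 'while j < n and B[j] == B[i]' = takeWhile/dropWhile on the suffix)
-- and updates the two accumulators count and pairs.
def altLoop : List Int → Int → Int → Int × Int
  | [], count, pairs => (count, pairs)
  | x :: xs, count, pairs =>
      let f : Int := 1 + ((xs.takeWhile (fun y => y == x)).length : Int)
      altLoop (xs.dropWhile (fun y => y == x))
        (count + PySem.Int.floordiv f 4)
        (pairs + if 2 ≤ PySem.Int.mod f 4 then 1 else 0)
termination_by l _ _ => l.length
decreasing_by
  simp only [List.length_cons]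
  exact Nat.lt_succ_of_le (List.length_dropWhile_le _ _)

def makeFrames_alt (A : List Int) : Int :=
  let B := PySem.List.sorted A (fun x => x) false
  let cp := altLoop B 0 0
  cp.1 + PySem.Int.floordiv cp.2 2

-- ===== PRECONDITION & SPEC =====
def Spec_makeFrames (A : List Int) (out : Int) : Prop := out = makeFrames_alt A
instance (A : List Int) (out : Int) : Decidable (Spec_makeFrames A out) := by unfold Spec_makeFrames; infer_instance

-- ===== CLAIM (what is proved, stated in full; the proofs are below) =====
def Claim_equal_makeFrames : Prop := ∀ (A : List Int), Dom_makeFrames A → Spec_makeFrames A (makeFrames A)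

-- ===== LEMMAS AND PROOFS =====

-- Per-element contributions of either program, against a reference list L:
-- count-contribution (count L i)//4 and pair-indicator [count L i % 4 ≥ 2].
def gC (L : List Int) (i : Int) : Int := ((List.count i L : Int)) / 4
def gP (L : List Int) (i : Int) : Int := if 2 ≤ ((List.count i L : Int)) % 4 then 1 else 0

-- the common value both programs compute, as a sum over a list s of distinct elements
def specF (L : List Int) (s : List Int) : Int :=
  (s.map (gC L)).sum + ((s.map (gP L)).sum) / 2

-- A's loop body in closed form: the branch structure collapses to one uniform step
theorem stepA_eq (A : List Int) (pl : List Int) (c : Int) (i : Int) :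
    (if 4 ≤ (PySem.List.count A i : Int) then
      if 2 ≤ PySem.Int.mod (PySem.List.count A i : Int) 4 then (pl ++ [i], c + PySem.Int.floordiv (PySem.List.count A i : Int) 4)
      else (pl, c + PySem.Int.floordiv (PySem.List.count A i : Int) 4)
    else if 1 < (PySem.List.count A i : Int) ∧ (PySem.List.count A i : Int) < 4 then
      (pl ++ [i], c)
    else (pl, c))
    = ((if 2 ≤ ((List.count i A : Int)) % 4 then pl ++ [i] else pl), c + gC A i) := by
  rw [PySem.List.count_eq, PySem.Int.floordiv_eq_ediv_of_pos (by norm_num),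
      PySem.Int.mod_eq_emod_of_pos (by norm_num)]
  set n : Int := (List.count i A : Int) with hn
  have hn0 : 0 ≤ n := by positivity
  unfold gC
  rw [← hn]
  by_cases h4 : (4:Int) ≤ n
  · simp only [h4, if_true]
    split_ifs <;> rfl
  · have hd : n / 4 = 0 := Int.ediv_eq_zero_of_lt hn0 (by omega)
    have hm : n % 4 = n := Int.emod_eq_of_lt hn0 (by omega)
    have hlt : n < 4 := by omega
    by_cases h1 : (1:Int) < n
    · have h2 : 2 ≤ n % 4 := by omega
      simp only [h4, if_false, h1, hlt, and_self, if_true, h2, hd, add_zero]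
    · have h2 : ¬ 2 ≤ n % 4 := by omega
      simp only [h4, if_false, h1, false_and, h2, hd, add_zero]

-- A's fold = initial accumulators plus the sums of the per-element contributions
theorem foldA (A : List Int) (s : List Int) (p0 : List Int) (c0 : Int) :
    (s.foldl (fun (st : List Int × Int) i =>
      if 4 ≤ (PySem.List.count A i : Int) then
        let c2 := st.2 + PySem.Int.floordiv (PySem.List.count A i : Int) 4
        if 2 ≤ PySem.Int.mod (PySem.List.count A i : Int) 4 then (st.1 ++ [i], c2)
        else (st.1, c2)
      else if 1 < (PySem.List.count A i : Int) ∧ (PySem.List.count A i : Int) < 4 then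
        (st.1 ++ [i], st.2)
      else st) (p0, c0)).2 = c0 + (s.map (gC A)).sum
    ∧ (((s.foldl (fun (st : List Int × Int) i =>
      if 4 ≤ (PySem.List.count A i : Int) then
        let c2 := st.2 + PySem.Int.floordiv (PySem.List.count A i : Int) 4
        if 2 ≤ PySem.Int.mod (PySem.List.count A i : Int) 4 then (st.1 ++ [i], c2)
        else (st.1, c2)
      else if 1 < (PySem.List.count A i : Int) ∧ (PySem.List.count A i : Int) < 4 then
        (st.1 ++ [i], st.2)
      else st) (p0, c0)).1.length : Int)) = (p0.length : Int) + (s.map (gP A)).sum := by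
  induction s generalizing p0 c0 with
  | nil => simp
  | cons i t ih =>
    simp only [List.foldl_cons, List.map_cons, List.sum_cons]
    rw [stepA_eq]
    by_cases h : 2 ≤ ((List.count i A : Int)) % 4
    · simp only [h, if_true]
      obtain ⟨ha, hb⟩ := ih (p0 ++ [i]) (c0 + gC A i)
      refine ⟨by rw [ha]; ring, ?_⟩
      rw [hb]
      simp [gP, h]
      ring
    · simp only [h, if_false]
      obtain ⟨ha, hb⟩ := ih p0 (c0 + gC A i)
      refine ⟨by rw [ha]; ring, ?_⟩
      rw [hb]
      simp [gP, h]

-- if the set has as many elements as the list, the list has no duplicates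
theorem nodup_of_len_eq (A : List Int) (h : (PySem.Set.ofList A).length = A.length) :
    A.Nodup := by
  have hperm : (PySem.Set.ofList A).Perm A.dedup := by
    rw [List.perm_ext_iff_of_nodup (PySem.Set.nodup_ofList A) A.nodup_dedup]
    intro a
    rw [PySem.Set.mem_ofList, List.mem_dedup]
  have hlen : A.dedup.length = A.length := by
    rw [← hperm.length_eq, h]
  exact List.dedup_eq_self.1 ((List.dedup_sublist A).eq_of_length hlen)

theorem specF_nodup (A : List Int) (h : A.Nodup) : specF A (PySem.Set.ofList A) = 0 := by
  unfold specF
  have h1 : ((PySem.Set.ofList A).map (gC A)).sum = 0 := by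
    apply List.sum_eq_zero
    intro x hx
    obtain ⟨i, hi, rfl⟩ := List.mem_map.1 hx
    unfold gC
    rw [List.count_eq_one_of_mem h ((PySem.Set.mem_ofList A i).1 hi)]
    rfl
  have h2 : ((PySem.Set.ofList A).map (gP A)).sum = 0 := by
    apply List.sum_eq_zero
    intro x hx
    obtain ⟨i, hi, rfl⟩ := List.mem_map.1 hx
    unfold gP
    rw [List.count_eq_one_of_mem h ((PySem.Set.mem_ofList A i).1 hi)]
    norm_num
  rw [h1, h2]
  rfl

theorem makeFrames_eq_specF (A : List Int) : makeFrames A = specF A (PySem.Set.ofList A) := by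
  unfold makeFrames
  dsimp only
  split_ifs with h
  · rw [specF_nodup A (nodup_of_len_eq A (by unfold PySem.Set.len at h; exact_mod_cast h))]
  · obtain ⟨h2, h1⟩ := foldA A (PySem.Set.ofList A) [] 0
    rw [PySem.Int.floordiv_eq_ediv_of_pos (by norm_num), h2, h1]
    simp [specF]

-- in a sorted list, everything surviving dropWhile (== x) is strictly greater than x
theorem dropWhile_gt (x : Int) (xs : List Int)
    (hp : (x :: xs).Pairwise (· ≤ ·)) :
    ∀ y ∈ xs.dropWhile (fun y => y == x), x < y := by
  intro y hy
  have hsub := List.dropWhile_sublist (l := xs) (fun y => y == x)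
  cases hd : xs.dropWhile (fun y => y == x) with
  | nil => simp [hd] at hy
  | cons h r =>
    rw [hd] at hy hsub
    have hhx : ¬ (h == x) = true := by
      have := List.head_dropWhile_not (fun y => y == x) (l := xs) (by rw [hd]; simp)
      simpa [hd] using this
    have hne : h ≠ x := by simpa using hhx
    have hxh : x ≤ h := by
      have hmem : h ∈ xs := hsub.subset (by simp)
      exact (List.pairwise_cons.1 hp).1 h hmem
    have hxlt : x < h := lt_of_le_of_ne hxh (Ne.symm hne)
    rcases List.mem_cons.1 hy with rfl | hyr
    · exact hxlt
    · have hpx : (h :: r).Pairwise (· ≤ ·) := (List.pairwise_cons.1 hp).2.sublist hsub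
      exact lt_of_lt_of_le hxlt ((List.pairwise_cons.1 hpx).1 y hyr)

-- B's loop on a sorted list = the same sums, over that list's distinct elements
theorem altLoop_sorted_aux (n : Nat) : ∀ L : List Int, L.length ≤ n → L.Pairwise (· ≤ ·) →
    ∀ c p : Int, altLoop L c p
      = (c + ((PySem.List.dedup L).map (gC L)).sum,
         p + ((PySem.List.dedup L).map (gP L)).sum) := by
  induction n with
  | zero =>
    intro L hL _ c p
    have : L = [] := List.length_eq_zero_iff.1 (Nat.le_zero.1 hL)
    subst this
    simp [altLoop, PySem.List.dedup]
  | succ n ih =>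
    intro L hL hp c p
    cases L with
    | nil => simp [altLoop, PySem.List.dedup]
    | cons x xs =>
      set t := xs.takeWhile (fun y => y == x) with htdef
      set d := xs.dropWhile (fun y => y == x) with hddef
      have hxs : t ++ d = xs := List.takeWhile_append_dropWhile
      have htx : ∀ y ∈ t, y = x := by
        intro y hy
        simpa using List.mem_takeWhile_imp hy
      have hdgt : ∀ y ∈ d, x < y := dropWhile_gt x xs hp
      have hxd : x ∉ d := fun hx => lt_irrefl x (hdgt x hx)
      have hcx : List.count x (x :: xs) = 1 + t.length := by
        rw [← hxs, List.count_cons_self, List.count_append]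
        have h1 : List.count x t = t.length := List.count_eq_length.2 (fun b hb => (htx b hb).symm)
        have h2 : List.count x d = 0 := List.count_eq_zero.2 hxd
        omega
      have hcy : ∀ y : Int, y ≠ x → List.count y (x :: xs) = List.count y d := by
        intro y hy
        have h3 : List.count y t = 0 := List.count_eq_zero.2 (fun hyt => hy (htx y hyt))
        rw [← hxs]
        simp [List.count_append, h3, Ne.symm hy]
      have hnd : x ∉ PySem.List.dedup d := fun h => hxd ((PySem.List.mem_dedup d x).1 h)
      have hperm : (PySem.List.dedup (x :: xs)).Perm (x :: PySem.List.dedup d) := by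
        rw [List.perm_ext_iff_of_nodup (PySem.List.nodup_dedup _)
          (List.nodup_cons.2 ⟨hnd, PySem.List.nodup_dedup d⟩)]
        intro a
        simp only [PySem.List.mem_dedup, List.mem_cons, ← hxs, List.mem_append]
        constructor
        · rintro (rfl | hta | hda)
          · exact Or.inl rfl
          · exact Or.inl (htx a hta)
          · exact Or.inr hda
        · rintro (rfl | hda)
          · exact Or.inl rfl
          · exact Or.inr (Or.inr hda)
      have hdp : d.Pairwise (· ≤ ·) :=
        (List.pairwise_cons.1 hp).2.sublist (List.dropWhile_sublist _)
      have hdl : d.length ≤ n := by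
        rw [hddef]
        have h1 := List.length_dropWhile_le (fun y => y == x) xs
        simp only [List.length_cons] at hL
        omega
      rw [altLoop]
      simp only [← htdef, ← hddef]
      rw [ih d hdl hdp]
      have hf : 1 + ((t.length : Nat) : Int) = (List.count x (x :: xs) : Int) := by
        rw [hcx]; push_cast; ring
      have hsumC : ((PySem.List.dedup (x :: xs)).map (gC (x :: xs))).sum
          = gC (x :: xs) x + ((PySem.List.dedup d).map (gC d)).sum := by
        rw [(hperm.map (gC (x :: xs))).sum_eq]
        simp only [List.map_cons, List.sum_cons]
        congr 1
        apply congrArg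
        apply List.map_congr_left
        intro a ha
        unfold gC
        rw [hcy a (fun h => hnd (h ▸ ha))]
      have hsumP : ((PySem.List.dedup (x :: xs)).map (gP (x :: xs))).sum
          = gP (x :: xs) x + ((PySem.List.dedup d).map (gP d)).sum := by
        rw [(hperm.map (gP (x :: xs))).sum_eq]
        simp only [List.map_cons, List.sum_cons]
        congr 1
        apply congrArg
        apply List.map_congr_left
        intro a ha
        unfold gP
        rw [hcy a (fun h => hnd (h ▸ ha))]
      rw [hsumC, hsumP]
      rw [PySem.Int.floordiv_eq_ediv_of_pos (by norm_num),
          PySem.Int.mod_eq_emod_of_pos (by norm_num), hf]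
      unfold gC gP
      rw [Prod.mk.injEq]
      constructor <;> ring

theorem makeFrames_alt_eq_specF (A : List Int) :
    makeFrames_alt A = specF A (PySem.Set.ofList A) := by
  unfold makeFrames_alt
  dsimp only
  set B := PySem.List.sorted A (fun x => x) false with hBdef
  have hperm : B.Perm A := PySem.List.sorted_perm A (fun x => x) false
  have hsortd : B.Pairwise (· ≤ ·) := by
    have := PySem.List.sorted_pairwise A (fun x => x)
    simpa [← hBdef] using this
  have hdperm : (PySem.List.dedup B).Perm (PySem.Set.ofList A) := by
    rw [List.perm_ext_iff_of_nodup (PySem.List.nodup_dedup B) (PySem.Set.nodup_ofList A)]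
    intro a
    rw [PySem.List.mem_dedup, PySem.Set.mem_ofList, hperm.mem_iff]
  have hgC : ∀ i : Int, gC B i = gC A i := by
    intro i
    unfold gC
    rw [hperm.count_eq i]
  have hgP : ∀ i : Int, gP B i = gP A i := by
    intro i
    unfold gP
    rw [hperm.count_eq i]
  rw [altLoop_sorted_aux B.length B (le_refl _) hsortd 0 0]
  simp only [zero_add]
  rw [List.map_congr_left (fun a _ => hgC a), List.map_congr_left (fun a _ => hgP a),
      (hdperm.map (gC A)).sum_eq, (hdperm.map (gP A)).sum_eq,
      PySem.Int.floordiv_eq_ediv_of_pos (by norm_num)]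
  rfl

-- ===== VERDICT (by name: the statement is the Claim_ definition above) =====
theorem makeFrames_spec : Claim_equal_makeFrames := by
  intro A _
  unfold Spec_makeFrames
  rw [makeFrames_eq_specF, makeFrames_alt_eq_specF]
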